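-- pv_equiv track=rewrite | github.com/airhac/Codeing_Test_prac | 코딩 테스트/구현 문제/외벽점검.py | solution
-- ===== SOURCE A (Python) =====
-- def solution(n, weak, dist):
--     count = 0
--     repair_list=[()]#공집합문제를 해결해주기위해서
--     wl = len(weak)
--     dl = len(dist)
--     dist.sort(reverse=True)
--
--     #고칠수 있는것을 리스트로 작성함으로써 count를 해주고 리스트의 크기가 원래 dist의 크기와 같아지면 return 해줍니다.
--     for can_m in dist:#4,3,2,1
--         count+=1
--         repairs = []
--         #수리가능한거만 확인해서 모은다
--         for i, w in enumerate(weak):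
--             ends = weak[i:] + [n + nw for nw in weak[:i]]
--             can = [end % n for end in ends if end - w <= can_m]
--             repairs.append(set(can))
--         #수리 가능한 경우 탐색
--
--         cand = set()
--         for repair in repairs:#repair도 set형식으로 넣어져 있어서 비교가능
--             #수리한 리스트에 있으면 안넣고 있는경우 리스트에 삽입
--             for x in repair_list:
--                 new = repair | set(x)
--                 if len(new) == wl:
--                     return count
--                 cand.add(tuple(new))
--         repair_list = cand
--     return -1
-- ===== SOURCE B (Python) =====
-- def solution(n, weak, dist):
--     # iterative deepening: for k = 1,2,... a depth-first search (with a visited set of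
--     # already-refuted states) decides whether some assignment of the k largest reaches
--     # to start points covers all weak points.
--     # Mutates dist like the original (sorts it in place, descending).
--     dist.sort(reverse=True)
--     wl = len(weak)
--
--     def cover(i, d):
--         # wall positions repaired by a friend starting at weak[i] with reach d
--         w = weak[i]
--         ends = weak[i:] + [n + x for x in weak[:i]]
--         return {e % n for e in ends if e - w <= d}
--
--     def feasible(ds, covered, visited):
--         if not ds:
--             return len(covered) == wl
--         key = (len(ds), frozenset(covered))
--         if key in visited:
--             return False
--         for i in range(wl):
--             if feasible(ds[1:], covered | cover(i, ds[0]), visited):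
--                 return True
--         visited.add(key)
--         return False
--
--     for k in range(1, len(dist) + 1):
--         if feasible(dist[:k], set(), set()):
--             return k
--     return -1
-- ===== Notes on version B (the rewrite author's own statement) =====
-- stated objective: alternative
-- what changed: A's breadth-first frontier (a set of tuples of coverage sets, expanded level by level with a cross product each round) is replaced by iterative deepening: for k = 1,2,... a recursive depth-first search with early exit and a visited set of already-refuted states decides whether some assignment of the k largest reaches covers all weak points; both sort dist in place (reverse=True) and the equivalence is about the return value.
-- outside the precondition, e.g. on solution(0, [5, 1], [-10]): A returns -1, B returns -1
import Mathlib
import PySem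

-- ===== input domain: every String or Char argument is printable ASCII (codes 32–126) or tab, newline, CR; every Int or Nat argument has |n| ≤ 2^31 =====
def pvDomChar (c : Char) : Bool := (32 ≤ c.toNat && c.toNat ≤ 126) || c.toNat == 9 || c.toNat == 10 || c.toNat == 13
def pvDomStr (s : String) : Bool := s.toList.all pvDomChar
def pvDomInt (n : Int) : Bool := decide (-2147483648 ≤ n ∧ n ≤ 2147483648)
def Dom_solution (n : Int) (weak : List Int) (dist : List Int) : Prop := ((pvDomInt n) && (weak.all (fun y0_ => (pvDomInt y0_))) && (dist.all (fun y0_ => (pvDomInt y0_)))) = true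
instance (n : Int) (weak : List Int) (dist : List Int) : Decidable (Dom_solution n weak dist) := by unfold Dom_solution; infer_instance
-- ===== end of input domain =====

-- B replaces A's breadth-first frontier of tuples of coverage sets by iterative deepening:
-- for k = 1,2,… a recursive depth-first search decides whether some assignment of the k
-- largest reaches covers everything (objective: alternative algorithm, same cost class).
-- Both A and B sort `dist` in place (reverse=True); the equivalence proved is about the return value.
-- Python iterates A's `repair_list` (a set of tuples) in hash order; the returned count does not
-- depend on that order, and the port consumes the set only order-insensitively.

-- ===== PORT A =====
-- repairs[i] = set(end % n for end in weak[i:]+[n+nw for nw in weak[:i]] if end - w <= can_m)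
def coverA (n : Int) (weak : List Int) (can_m : Int) (i : Int) (w : Int) : PySem.Set Int :=
  let ends := PySem.List.slice weak (some i) none ++
              (PySem.List.slice weak none (some i)).map (fun nw => n + nw)
  PySem.Set.ofList ((ends.filter (fun e => decide (e - w ≤ can_m))).map (fun e => PySem.Int.mod e n))

-- inner `for x in repair_list` loop; .inl = early `return count`, .inr = the updated cand
def innerA2 (wl count : Int) (repair : PySem.Set Int) :
    List (List Int) → PySem.Set (List Int) → Sum Int (PySem.Set (List Int))
  | [], cand => .inr cand
  | x :: xs, cand =>
    let new := PySem.Set.union repair (PySem.Set.ofList x)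
    if PySem.Set.len new = wl then .inl count
    else innerA2 wl count repair xs (PySem.Set.add cand new)

-- `for repair in repairs` loop
def innerA1 (wl count : Int) (repair_list : List (List Int)) :
    List (PySem.Set Int) → PySem.Set (List Int) → Sum Int (PySem.Set (List Int))
  | [], cand => .inr cand
  | r :: rs, cand =>
    match innerA2 wl count r repair_list cand with
    | .inl c => .inl c
    | .inr cand' => innerA1 wl count repair_list rs cand'

-- `for can_m in dist` loop; repair_list starts as [()]
def loopA (n : Int) (weak : List Int) (wl : Int) :
    List Int → Int → List (List Int) → Int
  | [], _, _ => -1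
  | can_m :: rest, count, repair_list =>
    let repairs := (PySem.List.enumerate weak).map (fun iw => coverA n weak can_m iw.1 iw.2)
    match innerA1 wl (count + 1) repair_list repairs PySem.Set.empty with
    | .inl c => c
    | .inr cand => loopA n weak wl rest (count + 1) cand

def solution (n : Int) (weak : List Int) (dist : List Int) : Int :=
  let wl : Int := weak.length
  loopA n weak wl (PySem.List.sorted dist (fun x => x) true) 0 [[]]

-- ===== PORT B =====
-- cover(i, d) = {e % n for e in weak[i:]+[n+x for x in weak[:i]] if e - weak[i] <= d}
-- (i comes from range(wl), so it is in range and pyGetD is exact for weak[i])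
def coverB (n : Int) (weak : List Int) (i : Int) (d : Int) : PySem.Set Int :=
  let w := PySem.List.pyGetD weak i 0
  let ends := PySem.List.slice weak (some i) none ++
              (PySem.List.slice weak none (some i)).map (fun x => n + x)
  PySem.Set.ofList ((ends.filter (fun e => decide (e - w ≤ d))).map (fun e => PySem.Int.mod e n))

-- feasible(ds, covered, visited): depth-first search; `visited` is Python's mutable set of
-- already-refuted (len(ds), frozenset(covered)) states, threaded through the recursion.
-- `key in visited` tests tuple equality with frozenset content equality: ported by hand as an
-- `any` over the list with Int `==` and PySem.Set.equal (exact for Python's set membership);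
-- `visited.add(key)` appends (the key was just tested absent, so no duplicate arises).
mutual
def feasB (n : Int) (weak : List Int) (wl : Int) (ds : List Int) (covered : PySem.Set Int)
    (vis : List (Int × PySem.Set Int)) : Bool × List (Int × PySem.Set Int) :=
  match ds with
  | [] => (PySem.Set.len covered == wl, vis)
  | d :: rest =>
    if vis.any (fun p => p.1 == ((rest.length : Int) + 1) && PySem.Set.equal p.2 covered) then
      (false, vis)
    else
      match feasLoop n weak wl rest d (PySem.List.pyRange 0 wl 1) covered vis with
      | (true, v) => (true, v)
      | (false, v) => (false, v ++ [(((rest.length : Int) + 1), covered)])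
termination_by (ds.length + 1, 0)

-- `for i in range(wl): if feasible(ds[1:], covered | cover(i, ds[0]), visited): return True`
def feasLoop (n : Int) (weak : List Int) (wl : Int) (rest : List Int) (d : Int)
    (is : List Int) (covered : PySem.Set Int) (vis : List (Int × PySem.Set Int)) :
    Bool × List (Int × PySem.Set Int) :=
  match is with
  | [] => (false, vis)
  | i :: is' =>
    match feasB n weak wl rest (PySem.Set.union covered (coverB n weak i d)) vis with
    | (true, v) => (true, v)
    | (false, v) => feasLoop n weak wl rest d is' covered v
termination_by (rest.length + 1, is.length + 1)
end

-- for k in range(1, len(dist)+1): if feasible(dist[:k], set(), set()): return k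
def loopBk (n : Int) (weak : List Int) (wl : Int) (ds : List Int) : List Int → Int
  | [] => -1
  | k :: ks =>
    if (feasB n weak wl (PySem.List.slice ds none (some k)) PySem.Set.empty []).1 then k
    else loopBk n weak wl ds ks

def solution_alt (n : Int) (weak : List Int) (dist : List Int) : Int :=
  let ds := PySem.List.sorted dist (fun x => x) true
  let wl : Int := weak.length
  loopBk n weak wl ds (PySem.List.pyRange 1 ((ds.length : Int) + 1) 1)

-- ===== PRECONDITION & SPEC =====
-- Pre_ excludes n = 0 with both lists nonempty: there Python's `end % n` can raise
-- ZeroDivisionError (and where it happens not to be evaluated both programs return -1 anyway).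
def Pre_solution (n : Int) (weak : List Int) (dist : List Int) : Prop :=
  n ≠ 0 ∨ weak = [] ∨ dist = []
instance (n : Int) (weak : List Int) (dist : List Int) : Decidable (Pre_solution n weak dist) := by
  unfold Pre_solution; infer_instance

def pvWitness_solution : Int × List Int × List Int := (7, [1, 3], [2, 1])

def Spec_solution (n : Int) (weak : List Int) (dist : List Int) (out : Int) : Prop := out = solution_alt n weak dist
instance (n : Int) (weak : List Int) (dist : List Int) (out : Int) : Decidable (Spec_solution n weak dist out) := by unfold Spec_solution; infer_instance

-- ===== CLAIM (what is proved, stated in full; the proofs are below) =====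
def Claim_equal_solution : Prop := ∀ (n : Int) (weak : List Int) (dist : List Int), Dom_solution n weak dist → Pre_solution n weak dist → Spec_solution n weak dist (solution n weak dist)

-- ===== LEMMAS AND PROOFS =====

def toF (x : List Int) : Finset Int := x.toFinset

-- reference machine on finsets (proof-only)
def refHitB (n : Int) (weak : List Int) (wl d : Int) (F : List (Finset Int)) : Bool :=
  F.any (fun X =>
    (PySem.List.pyRange 0 wl 1).any
      (fun i => (((coverB n weak i d).toFinset ∪ X).card : Int) == wl))

def refStep (n : Int) (weak : List Int) (wl d : Int) (F : List (Finset Int)) : List (Finset Int) :=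
  F.flatMap (fun X =>
    (PySem.List.pyRange 0 wl 1).map (fun i => (coverB n weak i d).toFinset ∪ X))

def refLoop (n : Int) (weak : List Int) (wl : Int) :
    List Int → Int → List (Finset Int) → Int
  | [], _, _ => -1
  | d :: rest, count, F =>
    if refHitB n weak wl d F then count + 1
    else refLoop n weak wl rest (count + 1) (refStep n weak wl d F)

lemma set_len_toFinset (s : PySem.Set Int) (h : s.Nodup) :
    PySem.Set.len s = (s.toFinset.card : Int) := by
  simp [PySem.Set.len, List.toFinset_card_of_nodup h]

lemma union_toFinset (s t : PySem.Set Int) :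
    (PySem.Set.union s t).toFinset = s.toFinset ∪ t.toFinset := by
  ext y; simp [PySem.Set.mem_union]

lemma enumerate_eq_map_range (xs : List Int) (s : Int) :
    PySem.List.enumerate xs s = (List.range xs.length).map (fun k : Nat => ((s : Int) + (k : Int), xs.getD k 0)) := by
  induction xs generalizing s with
  | nil => simp [PySem.List.enumerate]
  | cons x xs ih =>
    rw [PySem.List.enumerate_cons, ih]
    simp only [List.length_cons, List.range_succ_eq_map, List.map_cons, List.map_map]
    congr 1
    · simp
    · apply List.map_congr_left
      intro k _
      simp only [Function.comp_apply, List.getD_cons_succ, Prod.mk.injEq]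
      constructor
      · push_cast; ring
      · trivial

-- A's per-index coverage sets are exactly coverB
lemma coverA_eq_coverB (n : Int) (weak : List Int) (d : Int) (k : Nat) :
    coverA n weak d (k : Int) (weak.getD k 0) = coverB n weak (k : Int) d := by
  simp [coverA, coverB, PySem.List.pyGetD_natCast]

-- membership characterisation of A's repairs list
lemma mem_repairs (n : Int) (weak : List Int) (d : Int) (r : PySem.Set Int) :
    r ∈ (PySem.List.enumerate weak).map (fun iw => coverA n weak d iw.1 iw.2) ↔
      ∃ i ∈ PySem.List.pyRange 0 (weak.length : Int) 1, r = coverB n weak i d := by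
  rw [enumerate_eq_map_range, List.map_map]
  simp only [List.mem_map, List.mem_range, PySem.List.mem_pyRange_one, Function.comp_apply,
    zero_add]
  constructor
  · rintro ⟨k, hk, rfl⟩
    refine ⟨(k : Int), ⟨by exact_mod_cast Nat.zero_le k, by exact_mod_cast hk⟩, ?_⟩
    exact coverA_eq_coverB n weak d k
  · rintro ⟨i, ⟨h0, hlt⟩, rfl⟩
    have hklt : i.toNat < weak.length := by omega
    refine ⟨i.toNat, hklt, ?_⟩
    have hi : ((i.toNat : Nat) : Int) = i := Int.toNat_of_nonneg h0
    rw [show coverB n weak i d = coverB n weak ((i.toNat : Nat) : Int) d by rw [hi]]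
    exact coverA_eq_coverB n weak d i.toNat

lemma innerA2_hit (wl count : Int) (r : PySem.Set Int) (xs : List (List Int))
    (cand : PySem.Set (List Int))
    (h : ∃ x ∈ xs, PySem.Set.len (PySem.Set.union r (PySem.Set.ofList x)) = wl) :
    innerA2 wl count r xs cand = .inl count := by
  induction xs generalizing cand with
  | nil => simp at h
  | cons x xs ih =>
    rw [innerA2]
    split
    · rfl
    · rcases h with ⟨y, hy, hlen⟩
      rcases List.mem_cons.mp hy with rfl | hy'
      · simp_all
      · exact ih _ ⟨y, hy', hlen⟩

lemma innerA2_nohit (wl count : Int) (r : PySem.Set Int) (xs : List (List Int))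
    (cand : PySem.Set (List Int))
    (h : ∀ x ∈ xs, PySem.Set.len (PySem.Set.union r (PySem.Set.ofList x)) ≠ wl) :
    innerA2 wl count r xs cand =
      .inr (xs.foldl (fun c x => PySem.Set.add c (PySem.Set.union r (PySem.Set.ofList x))) cand) := by
  induction xs generalizing cand with
  | nil => rfl
  | cons x xs ih =>
    rw [innerA2, List.foldl_cons]
    split
    · exact absurd (by assumption) (h x (by simp))
    · exact ih _ (fun y hy => h y (List.mem_cons_of_mem _ hy))

lemma innerA1_hit (wl count : Int) (R : List (List Int)) (rs : List (PySem.Set Int))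
    (cand : PySem.Set (List Int))
    (h : ∃ r ∈ rs, ∃ x ∈ R, PySem.Set.len (PySem.Set.union r (PySem.Set.ofList x)) = wl) :
    innerA1 wl count R rs cand = .inl count := by
  induction rs generalizing cand with
  | nil => simp at h
  | cons r rs ih =>
    rw [innerA1]
    by_cases hr : ∃ x ∈ R, PySem.Set.len (PySem.Set.union r (PySem.Set.ofList x)) = wl
    · rw [innerA2_hit wl count r R cand hr]
    · rw [innerA2_nohit wl count r R cand (by push Not at hr; exact hr)]
      rcases h with ⟨r', hr', hx⟩
      rcases List.mem_cons.mp hr' with rfl | hr''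
      · exact absurd hx hr
      · exact ih _ ⟨r', hr'', hx⟩

lemma innerA1_nohit (wl count : Int) (R : List (List Int)) (rs : List (PySem.Set Int))
    (cand : PySem.Set (List Int))
    (h : ∀ r ∈ rs, ∀ x ∈ R, PySem.Set.len (PySem.Set.union r (PySem.Set.ofList x)) ≠ wl) :
    innerA1 wl count R rs cand =
      .inr (rs.foldl (fun c r =>
        R.foldl (fun c x => PySem.Set.add c (PySem.Set.union r (PySem.Set.ofList x))) c) cand) := by
  induction rs generalizing cand with
  | nil => rfl
  | cons r rs ih =>
    rw [innerA1, List.foldl_cons,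
      innerA2_nohit wl count r R cand (fun x hx => h r (by simp) x hx)]
    exact ih _ (fun r' hr' x hx => h r' (List.mem_cons_of_mem _ hr') x hx)

lemma mem_double_fold (R : List (List Int)) (rs : List (PySem.Set Int))
    (cand : PySem.Set (List Int)) (y : List Int) :
    y ∈ rs.foldl (fun c r =>
        R.foldl (fun c x => PySem.Set.add c (PySem.Set.union r (PySem.Set.ofList x))) c) cand ↔
      y ∈ cand ∨ ∃ r ∈ rs, ∃ x ∈ R, y = PySem.Set.union r (PySem.Set.ofList x) := by
  induction rs generalizing cand with
  | nil => simp
  | cons r rs ih =>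
    rw [List.foldl_cons, ih]
    rw [PySem.Set.mem_foldl_add R (fun x => PySem.Set.union r (PySem.Set.ofList x)) cand y]
    constructor
    · rintro (⟨h1 | ⟨x, hx, rfl⟩⟩ | ⟨r', hr', x, hx, rfl⟩)
      · exact Or.inl h1
      · exact Or.inr ⟨r, by simp, x, hx, rfl⟩
      · exact Or.inr ⟨r', List.mem_cons_of_mem _ hr', x, hx, rfl⟩
    · rintro (h1 | ⟨r', hr', x, hx, rfl⟩)
      · exact Or.inl (Or.inl h1)
      · rcases List.mem_cons.mp hr' with rfl | hr''
        · exact Or.inl (Or.inr ⟨x, hx, rfl⟩)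
        · exact Or.inr ⟨r', hr'', x, hx, rfl⟩

lemma refLoop_congr (n : Int) (weak : List Int) (wl : Int) (rest : List Int) (count : Int)
    (F F' : List (Finset Int)) (h : ∀ y, y ∈ F ↔ y ∈ F') :
    refLoop n weak wl rest count F = refLoop n weak wl rest count F' := by
  induction rest generalizing count F F' with
  | nil => rfl
  | cons d rest ih =>
    rw [refLoop, refLoop]
    have hhit : refHitB n weak wl d F = refHitB n weak wl d F' := by
      apply Bool.coe_iff_coe.mp
      simp only [refHitB, List.any_eq_true]
      constructor
      · rintro ⟨X, hX, hi⟩; exact ⟨X, (h X).mp hX, hi⟩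
      · rintro ⟨X, hX, hi⟩; exact ⟨X, (h X).mpr hX, hi⟩
    rw [hhit]
    split
    · rfl
    · apply ih
      intro y
      simp only [refStep, List.mem_flatMap, List.mem_map]
      constructor
      · rintro ⟨X, hX, hi⟩; exact ⟨X, (h X).mp hX, hi⟩
      · rintro ⟨X, hX, hi⟩; exact ⟨X, (h X).mpr hX, hi⟩

lemma nodup_coverB (n : Int) (weak : List Int) (i d : Int) : (coverB n weak i d).Nodup := by
  unfold coverB
  exact PySem.Set.nodup_ofList _

lemma toFinset_ofList (x : List Int) : (PySem.Set.ofList x).toFinset = x.toFinset := by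
  ext y; simp [PySem.Set.mem_ofList]

lemma hit_iff (n : Int) (weak : List Int) (d : Int) (R : List (List Int)) :
    (∃ r ∈ (PySem.List.enumerate weak).map (fun iw => coverA n weak d iw.1 iw.2),
       ∃ x ∈ R, PySem.Set.len (PySem.Set.union r (PySem.Set.ofList x)) = (weak.length : Int)) ↔
      refHitB n weak (weak.length : Int) d (R.map toF) = true := by
  simp only [refHitB, List.any_eq_true, List.mem_map, beq_iff_eq]
  constructor
  · rintro ⟨r, hr, x, hx, hlen⟩
    rcases (mem_repairs n weak d r).mp (List.mem_map.mpr hr) with ⟨i, hi, rfl⟩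
    refine ⟨toF x, ⟨x, hx, rfl⟩, i, hi, ?_⟩
    rw [set_len_toFinset _ (PySem.Set.nodup_union _ _ (nodup_coverB n weak i d)),
      union_toFinset, toFinset_ofList] at hlen
    exact hlen
  · rintro ⟨X, ⟨x, hx, rfl⟩, i, hi, hcard⟩
    refine ⟨coverB n weak i d, List.mem_map.mp ((mem_repairs n weak d _).mpr ⟨i, hi, rfl⟩), x, hx, ?_⟩
    rw [set_len_toFinset _ (PySem.Set.nodup_union _ _ (nodup_coverB n weak i d)),
      union_toFinset, toFinset_ofList]
    exact hcard

lemma loopA_eq_refLoop (n : Int) (weak : List Int) (rest : List Int) (count : Int)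
    (R : List (List Int)) :
    loopA n weak (weak.length : Int) rest count R =
      refLoop n weak (weak.length : Int) rest count (R.map toF) := by
  induction rest generalizing count R with
  | nil => rfl
  | cons d rest ih =>
    by_cases hhit : ∃ r ∈ (PySem.List.enumerate weak).map (fun iw => coverA n weak d iw.1 iw.2),
        ∃ x ∈ R, PySem.Set.len (PySem.Set.union r (PySem.Set.ofList x)) = (weak.length : Int)
    · have e1 := innerA1_hit (weak.length : Int) (count + 1) R
        ((PySem.List.enumerate weak).map (fun iw => coverA n weak d iw.1 iw.2))
        PySem.Set.empty hhit
      simp only [loopA, refLoop, e1, if_pos ((hit_iff n weak d R).mp hhit)]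
    · have hno : ∀ r ∈ (PySem.List.enumerate weak).map (fun iw => coverA n weak d iw.1 iw.2),
          ∀ x ∈ R, PySem.Set.len (PySem.Set.union r (PySem.Set.ofList x)) ≠ (weak.length : Int) := by
        push Not at hhit; exact hhit
      have e1 := innerA1_nohit (weak.length : Int) (count + 1) R
        ((PySem.List.enumerate weak).map (fun iw => coverA n weak d iw.1 iw.2))
        PySem.Set.empty hno
      simp only [loopA, refLoop, e1, if_neg (fun hc => hhit ((hit_iff n weak d R).mpr hc))]
      rw [ih (count + 1) _]
      apply refLoop_congr
      intro y
      simp only [List.mem_map, refStep, List.mem_flatMap]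
      constructor
      · rintro ⟨z, hz, rfl⟩
        rcases (mem_double_fold R _ _ z).mp hz with h1 | ⟨r, hr, x, hx, rfl⟩
        · simp [PySem.Set.empty] at h1
        · rcases (mem_repairs n weak d r).mp hr with ⟨i, hi, rfl⟩
          refine ⟨toF x, ⟨x, hx, rfl⟩, ⟨i, hi, ?_⟩⟩
          show (coverB n weak i d).toFinset ∪ x.toFinset = toF _
          rw [toF, union_toFinset, toFinset_ofList]
      · rintro ⟨X, ⟨x, hx, rfl⟩, i, hi, rfl⟩
        refine ⟨PySem.Set.union (coverB n weak i d) (PySem.Set.ofList x), ?_, ?_⟩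
        · exact (mem_double_fold R _ _ _).mpr
            (Or.inr ⟨coverB n weak i d, (mem_repairs n weak d _).mpr ⟨i, hi, rfl⟩, x, hx, rfl⟩)
        · rw [toF, union_toFinset, toFinset_ofList]; rfl

-- ===== B-side: iterative-deepening DFS semantics =====

-- all coverage-unions over the assignment paths of a distance list
def unionsF (n : Int) (weak : List Int) (wl : Int) : List Int → List (Finset Int)
  | [] => [∅]
  | d :: rest =>
    (PySem.List.pyRange 0 wl 1).flatMap
      (fun i => (unionsF n weak wl rest).map (fun Y => (coverB n weak i d).toFinset ∪ Y))

lemma mem_foldl_refStep (n : Int) (weak : List Int) (wl : Int) (ds : List Int)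
    (F0 : List (Finset Int)) (y : Finset Int) :
    y ∈ ds.foldl (fun F d => refStep n weak wl d F) F0 ↔
      ∃ X ∈ F0, ∃ Y ∈ unionsF n weak wl ds, y = X ∪ Y := by
  induction ds generalizing F0 with
  | nil => simp [unionsF]
  | cons d ds ih =>
    rw [List.foldl_cons, ih]
    simp only [unionsF, refStep, List.mem_flatMap, List.mem_map]
    constructor
    · rintro ⟨X', ⟨X, hX, i, hi, rfl⟩, Y, hY, rfl⟩
      exact ⟨X, hX, (coverB n weak i d).toFinset ∪ Y, ⟨i, hi, Y, hY, rfl⟩,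
        by rw [Finset.union_comm (coverB n weak i d).toFinset X, Finset.union_assoc]⟩
    · rintro ⟨X, hX, Z, ⟨i, hi, Y, hY, rfl⟩, rfl⟩
      exact ⟨(coverB n weak i d).toFinset ∪ X, ⟨X, hX, i, hi, rfl⟩, Y, hY,
        by rw [Finset.union_comm (coverB n weak i d).toFinset X, Finset.union_assoc]⟩

lemma mem_unionsF_append (n : Int) (weak : List Int) (wl : Int) (xs : List Int) (d : Int)
    (y : Finset Int) :
    y ∈ unionsF n weak wl (xs ++ [d]) ↔
      ∃ i ∈ PySem.List.pyRange 0 wl 1, ∃ Y ∈ unionsF n weak wl xs,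
        y = (coverB n weak i d).toFinset ∪ Y := by
  induction xs generalizing y with
  | nil => simp [unionsF]
  | cons x xs ih =>
    simp only [List.cons_append, unionsF, List.mem_flatMap, List.mem_map]
    constructor
    · rintro ⟨i0, hi0, Z, hZ, rfl⟩
      rcases (ih Z).mp hZ with ⟨i, hi, Y, hY, rfl⟩
      refine ⟨i, hi, (coverB n weak i0 x).toFinset ∪ Y, ⟨i0, hi0, Y, hY, rfl⟩, ?_⟩
      rw [← Finset.union_assoc, Finset.union_comm (coverB n weak i0 x).toFinset,
        Finset.union_assoc]
    · rintro ⟨i, hi, Y', ⟨i0, hi0, Y, hY, rfl⟩, rfl⟩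
      refine ⟨i0, hi0, (coverB n weak i d).toFinset ∪ Y, (ih _).mpr ⟨i, hi, Y, hY, rfl⟩, ?_⟩
      rw [← Finset.union_assoc, Finset.union_comm (coverB n weak i0 x).toFinset,
        Finset.union_assoc]

-- the existence spec of one feasibility call: some assignment path for ds tops S up to wl
def FeasP (n : Int) (weak : List Int) (wl : Int) (ds : List Int) (S : Finset Int) : Prop :=
  ∃ Y ∈ unionsF n weak wl ds, ((S ∪ Y).card : Int) = wl

lemma FeasP_nil (n : Int) (weak : List Int) (wl : Int) (S : Finset Int) :
    FeasP n weak wl [] S ↔ (S.card : Int) = wl := by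
  simp [FeasP, unionsF]

lemma FeasP_cons (n : Int) (weak : List Int) (wl : Int) (d : Int) (rest : List Int)
    (S : Finset Int) :
    FeasP n weak wl (d :: rest) S ↔
      ∃ i ∈ PySem.List.pyRange 0 wl 1,
        FeasP n weak wl rest (S ∪ (coverB n weak i d).toFinset) := by
  simp only [FeasP, unionsF, List.mem_flatMap, List.mem_map]
  constructor
  · rintro ⟨Z, ⟨i, hi, Y, hY, rfl⟩, hc⟩
    exact ⟨i, hi, Y, hY, by rw [Finset.union_assoc]; exact hc⟩
  · rintro ⟨i, hi, Y, hY, hc⟩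
    exact ⟨(coverB n weak i d).toFinset ∪ Y, ⟨i, hi, Y, hY, rfl⟩,
      by rw [← Finset.union_assoc]; exact hc⟩

-- invariant of the visited set: every stored (m, S) refutes the suffix of that length
def InvV (n : Int) (weak : List Int) (wl : Int) (dsk : List Int)
    (vis : List (Int × PySem.Set Int)) : Prop :=
  ∀ p ∈ vis, ∀ ds' : List Int, ds' <:+ dsk → (ds'.length : Int) = p.1 →
    ¬ FeasP n weak wl ds' p.2.toFinset

lemma equal_toFinset (s t : PySem.Set Int) (h : PySem.Set.equal s t = true) :
    s.toFinset = t.toFinset := by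
  ext y
  simp only [List.mem_toFinset]
  exact (PySem.Set.equal_iff s t).mp h y

lemma suffix_unique (a b dsk : List Int) (ha : a <:+ dsk) (hb : b <:+ dsk)
    (hl : a.length = b.length) : a = b := by
  rcases ha with ⟨t, rfl⟩
  rcases hb with ⟨u, hu⟩
  exact ((List.append_inj' hu hl.symm).2).symm

lemma nodup_empty : (PySem.Set.empty (α := Int)).Nodup := by
  simp [PySem.Set.empty]

lemma toFinset_empty : (PySem.Set.empty (α := Int)).toFinset = ∅ := by
  simp [PySem.Set.empty]

-- correctness of the memoised DFS: result ↔ FeasP, and the visited invariant is preserved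
lemma feasB_spec (n : Int) (weak : List Int) (wl : Int) (dsk : List Int) :
    ∀ (ds : List Int), ds <:+ dsk → ∀ (covered : PySem.Set Int)
      (vis : List (Int × PySem.Set Int)), covered.Nodup → InvV n weak wl dsk vis →
      ((feasB n weak wl ds covered vis).1 = true ↔ FeasP n weak wl ds covered.toFinset) ∧
        InvV n weak wl dsk (feasB n weak wl ds covered vis).2 := by
  intro ds
  induction ds with
  | nil =>
    intro _ covered vis hnd hinv
    rw [show feasB n weak wl [] covered vis = (PySem.Set.len covered == wl, vis) from by
      rw [feasB]]
    refine ⟨?_, hinv⟩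
    rw [FeasP_nil]
    show ((PySem.Set.len covered == wl : Bool) = true ↔ _)
    rw [beq_iff_eq, set_len_toFinset _ hnd]
  | cons d rest ih =>
    intro hsuf covered vis hnd hinv
    have hrest : rest <:+ dsk := by
      rcases hsuf with ⟨t, rfl⟩
      exact ⟨t ++ [d], by simp⟩
    -- the inner loop, by induction on the range list
    have hloop : ∀ (is : List Int) (vis' : List (Int × PySem.Set Int)),
        InvV n weak wl dsk vis' →
        ((feasLoop n weak wl rest d is covered vis').1 = true ↔
          ∃ i ∈ is, FeasP n weak wl rest
            (covered.toFinset ∪ (coverB n weak i d).toFinset)) ∧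
          InvV n weak wl dsk (feasLoop n weak wl rest d is covered vis').2 := by
      intro is
      induction is with
      | nil =>
        intro vis' hinv'
        rw [show feasLoop n weak wl rest d [] covered vis' = (false, vis') from by
          rw [feasLoop]]
        exact ⟨by simp, hinv'⟩
      | cons i is' ihis =>
        intro vis' hinv'
        obtain ⟨hiff, hinv2⟩ := ih hrest (PySem.Set.union covered (coverB n weak i d)) vis'
          (PySem.Set.nodup_union _ _ hnd) hinv'
        rw [union_toFinset] at hiff
        rcases hres : feasB n weak wl rest (PySem.Set.union covered (coverB n weak i d)) vis'
          with ⟨found, v⟩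
        rw [hres] at hiff hinv2
        have hunf : feasLoop n weak wl rest d (i :: is') covered vis' =
            (match (found, v) with
              | (true, v) => (true, v)
              | (false, v) => feasLoop n weak wl rest d is' covered v) := by
          rw [feasLoop, hres]
        cases found with
        | true =>
          rw [hunf]
          exact ⟨iff_of_true rfl ⟨i, by simp, hiff.mp rfl⟩, hinv2⟩
        | false =>
          have hnp : ¬ FeasP n weak wl rest
              (covered.toFinset ∪ (coverB n weak i d).toFinset) :=
            fun h => by simpa using hiff.mpr h
          obtain ⟨hiff', hinv3⟩ := ihis v hinv2
          rw [hunf]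
          refine ⟨?_, hinv3⟩
          rw [hiff']
          constructor
          · rintro ⟨j, hj, hf⟩
            exact ⟨j, List.mem_cons_of_mem _ hj, hf⟩
          · rintro ⟨j, hj, hf⟩
            rcases List.mem_cons.mp hj with rfl | hj'
            · exact absurd hf hnp
            · exact ⟨j, hj', hf⟩
    rw [show feasB n weak wl (d :: rest) covered vis =
      (if vis.any (fun p => p.1 == ((rest.length : Int) + 1) && PySem.Set.equal p.2 covered) then
        (false, vis)
      else
        match feasLoop n weak wl rest d (PySem.List.pyRange 0 wl 1) covered vis with
        | (true, v) => (true, v)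
        | (false, v) => (false, v ++ [(((rest.length : Int) + 1), covered)])) from by
      rw [feasB]]
    by_cases hmem : vis.any
        (fun p => p.1 == ((rest.length : Int) + 1) && PySem.Set.equal p.2 covered) = true
    · rw [if_pos hmem]
      rcases List.any_eq_true.mp hmem with ⟨p, hp, hpe⟩
      rw [Bool.and_eq_true, beq_iff_eq] at hpe
      have href := hinv p hp (d :: rest) hsuf
        (by rw [hpe.1, List.length_cons]; push_cast; ring)
      rw [equal_toFinset _ _ hpe.2] at href
      exact ⟨iff_of_false (by simp) href, hinv⟩
    · rw [if_neg hmem]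
      obtain ⟨hiff, hinv2⟩ := hloop (PySem.List.pyRange 0 wl 1) vis hinv
      rcases hres : feasLoop n weak wl rest d (PySem.List.pyRange 0 wl 1) covered vis
        with ⟨found, v⟩
      rw [hres] at hiff hinv2
      cases found with
      | true =>
        exact ⟨iff_of_true rfl ((FeasP_cons n weak wl d rest _).mpr (hiff.mp rfl)), hinv2⟩
      | false =>
        have hnf : ¬ FeasP n weak wl (d :: rest) covered.toFinset := by
          rw [FeasP_cons]
          intro h
          simpa using hiff.mpr h
        refine ⟨iff_of_false (by simp) hnf, ?_⟩
        intro p hp ds' hsuf' hlen'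
        rcases List.mem_append.mp hp with hp' | hp'
        · exact hinv2 p hp' ds' hsuf' hlen'
        · simp only [List.mem_singleton] at hp'
          subst hp'
          have hds' : ds' = d :: rest := by
            apply suffix_unique ds' (d :: rest) dsk hsuf' hsuf
            have h1 : (ds'.length : Int) = (rest.length : Int) + 1 := hlen'
            simp only [List.length_cons]
            omega
          subst hds'
          exact hnf

lemma feasB_append_eq_hit (n : Int) (weak : List Int) (wl : Int) (pref : List Int) (d : Int) :
    (feasB n weak wl (pref ++ [d]) PySem.Set.empty []).1 =
      refHitB n weak wl d (pref.foldl (fun F e => refStep n weak wl e F) [∅]) := by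
  apply Bool.coe_iff_coe.mp
  rw [(feasB_spec n weak wl (pref ++ [d]) (pref ++ [d]) (List.suffix_refl _) PySem.Set.empty []
    nodup_empty (by intro p hp; simp at hp)).1]
  rw [toFinset_empty]
  simp only [refHitB, List.any_eq_true, beq_iff_eq, FeasP]
  constructor
  · rintro ⟨Z, hZ, hcard⟩
    rcases (mem_unionsF_append n weak wl pref d Z).mp hZ with ⟨i, hi, Y, hY, rfl⟩
    refine ⟨Y, ?_, i, hi, ?_⟩
    · exact (mem_foldl_refStep n weak wl pref [∅] Y).mpr ⟨∅, by simp, Y, hY, by simp⟩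
    · rw [Finset.empty_union] at hcard
      exact hcard
  · rintro ⟨X, hX, i, hi, hcard⟩
    rcases (mem_foldl_refStep n weak wl pref [∅] X).mp hX with ⟨E, hE, Y, hY, rfl⟩
    simp only [List.mem_singleton] at hE
    subst hE
    rw [Finset.empty_union] at hcard
    refine ⟨(coverB n weak i d).toFinset ∪ Y,
      (mem_unionsF_append n weak wl pref d _).mpr ⟨i, hi, Y, hY, rfl⟩, ?_⟩
    rw [Finset.empty_union]
    exact hcard

lemma refLoop_eq_loopBk (n : Int) (weak : List Int) (wl : Int) :
    ∀ (rem pref : List Int),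
      refLoop n weak wl rem (pref.length : Int)
          (pref.foldl (fun F e => refStep n weak wl e F) [∅]) =
        loopBk n weak wl (pref ++ rem)
          (PySem.List.pyRange ((pref.length : Int) + 1)
            ((pref.length : Int) + (rem.length : Int) + 1) 1) := by
  intro rem
  induction rem with
  | nil =>
    intro pref
    rw [PySem.List.pyRange_one_eq_nil (by simp)]
    rfl
  | cons d rem ih =>
    intro pref
    have hlt : (pref.length : Int) + 1 < (pref.length : Int) + ((d :: rem).length : Int) + 1 := by
      push_cast [List.length_cons]; omega
    rw [PySem.List.pyRange_one_cons (by omega : (pref.length : Int) + 1 <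
      (pref.length : Int) + ((d :: rem).length : Int) + 1)]
    rw [loopBk]
    have hslice : PySem.List.slice (pref ++ d :: rem) none (some ((pref.length : Int) + 1)) =
        pref ++ [d] := by
      rw [PySem.List.slice_to _ (by positivity)]
      have h0 : ((pref.length : Int) + 1).toNat = pref.length + 1 := by omega
      have h1 : pref.length + 1 - pref.length = 1 := by omega
      simp [h0, List.take_append, h1, List.take_of_length_le (Nat.le_succ _)]
    rw [hslice, feasB_append_eq_hit]
    rw [refLoop]
    split
    · rfl
    · have := ih (pref ++ [d])
      rw [List.foldl_append] at this
      simp only [List.foldl_cons, List.foldl_nil] at this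
      rw [show (pref ++ [d]) ++ rem = pref ++ d :: rem by simp] at this
      rw [show ((pref ++ [d]).length : Int) = (pref.length : Int) + 1 by simp] at this
      rw [show (pref.length : Int) + ((d :: rem).length : Int) + 1 =
        ((pref.length : Int) + 1) + (rem.length : Int) + 1 from by
          push_cast [List.length_cons]; ring]
      exact this

-- ===== VERDICT (by name: the statement is the Claim_ definition above) =====
theorem solution_spec : Claim_equal_solution := by
  intro n weak dist _ _
  unfold Spec_solution solution solution_alt
  rw [loopA_eq_refLoop]
  have h := refLoop_eq_loopBk n weak (weak.length : Int)
    (PySem.List.sorted dist (fun x => x) true) []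
  simp only [List.length_nil, Nat.cast_zero, List.foldl_nil, List.nil_append, zero_add] at h
  rw [show ([[]] : List (List Int)).map toF = [∅] by simp [toF]]
  rw [h]
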